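-- pv_equiv track=rewrite | github.com/Akylas/alpimaps_data_generator | scripts/utils/tilemask.py | buildTileMask
-- ===== SOURCE A (Python) =====
-- def buildTileMask(tiles, x, y, zoom, maxZoom):
--   if (x, y, zoom) not in tiles:
--     return [0, 0]
--   if zoom == maxZoom:
--     return [0, 1]
--   subTrees = []
--   for dy in range(0, 2):
--     for dx in range(0, 2):
--       subTree = buildTileMask(tiles, x * 2 + dx, y * 2 + dy, zoom + 1, maxZoom)
--       subTrees += subTree
--   if subTrees == [0, 1, 0, 1, 0, 1, 0, 1]:
--     return [0, 1] # Optimization, no need to store subtile data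
--   return [1, 1] + subTrees
-- ===== SOURCE B (Python) =====
-- def buildTileMask(tiles, x, y, zoom, maxZoom):
--     tileset = set(tiles)
--     work = [(False, x, y, zoom)]
--     vals = []
--     while work:
--         combine, cx, cy, cz = work.pop()
--         if combine:
--             r4 = vals.pop(); r3 = vals.pop(); r2 = vals.pop(); r1 = vals.pop()
--             sub = r1 + r2 + r3 + r4
--             vals.append([0, 1] if sub == [0, 1, 0, 1, 0, 1, 0, 1] else [1, 1] + sub)
--         elif (cx, cy, cz) not in tileset:
--             vals.append([0, 0])
--         elif cz == maxZoom:
--             vals.append([0, 1])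
--         else:
--             work.append((True, cx, cy, cz))
--             for dy in (1, 0):
--                 for dx in (1, 0):
--                     work.append((False, cx * 2 + dx, cy * 2 + dy, cz + 1))
--     return vals[0]
-- ===== Notes on version B (the rewrite author's own statement) =====
-- stated objective: alternative
-- what changed: Replaces A's four-way recursion with an explicit-stack iterative post-order DFS (work stack of descend/combine frames plus a value stack) over a prebuilt set of tiles, emitting and combining child masks in the same order.
import Mathlib
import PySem

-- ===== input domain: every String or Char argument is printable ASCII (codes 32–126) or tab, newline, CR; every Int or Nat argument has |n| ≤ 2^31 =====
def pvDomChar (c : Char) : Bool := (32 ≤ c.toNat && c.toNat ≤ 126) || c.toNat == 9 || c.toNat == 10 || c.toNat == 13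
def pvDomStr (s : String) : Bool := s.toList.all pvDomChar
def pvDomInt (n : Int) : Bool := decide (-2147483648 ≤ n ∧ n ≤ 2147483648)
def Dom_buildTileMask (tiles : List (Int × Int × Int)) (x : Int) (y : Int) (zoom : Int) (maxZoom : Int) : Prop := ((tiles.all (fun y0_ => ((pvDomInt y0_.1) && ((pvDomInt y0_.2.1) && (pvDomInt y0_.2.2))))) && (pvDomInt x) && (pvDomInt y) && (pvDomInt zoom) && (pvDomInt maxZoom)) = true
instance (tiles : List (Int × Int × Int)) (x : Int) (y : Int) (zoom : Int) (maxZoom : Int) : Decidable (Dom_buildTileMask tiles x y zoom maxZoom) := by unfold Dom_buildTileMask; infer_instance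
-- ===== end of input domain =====

-- B replaces A's recursion by an explicit-stack iterative post-order DFS (objective: alternative decomposition, same cost).

-- largest zoom occurring in tiles; bounds the recursion/stack depth (used by both ports' termination)
def pvMaxZ (tiles : List (Int × Int × Int)) : Int :=
  tiles.foldl (fun m t => max m t.2.2) 0

theorem pvMaxZ_init_le (tiles : List (Int × Int × Int)) (a : Int) :
    a ≤ tiles.foldl (fun m t => max m t.2.2) a := by
  induction tiles generalizing a with
  | nil => simp
  | cons h t ih => exact le_trans (le_max_left _ _) (ih (max a h.2.2))

theorem pvMem_le_maxZ (tiles : List (Int × Int × Int)) (x y z : Int)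
    (h : (x, y, z) ∈ tiles) : z ≤ pvMaxZ tiles := by
  unfold pvMaxZ
  generalize ha : (0 : Int) = a
  clear ha
  induction tiles generalizing a with
  | nil => simp at h
  | cons hd tl ih =>
    rcases List.mem_cons.mp h with h1 | h2
    · subst h1
      exact le_trans (le_max_right _ _) (pvMaxZ_init_le tl _)
    · exact ih h2 _

-- termination lemma for the recursion of port A (cited by name in its decreasing_by)
theorem pvDepth_lt (tiles : List (Int × Int × Int)) (x y z : Int)
    (h : (x, y, z) ∈ tiles) :
    (pvMaxZ tiles + 1 - (z + 1)).toNat < (pvMaxZ tiles + 1 - z).toNat := by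
  have := pvMem_le_maxZ tiles x y z h
  omega

-- ===== PORT A =====
-- literal recursion; the for dy/for dx loop over range(0,2) is unrolled into its four
-- fixed iterations (dy,dx) = (0,0),(0,1),(1,0),(1,1), concatenated in the same order
def buildTileMask (tiles : List (Int × Int × Int)) (x : Int) (y : Int) (zoom : Int) (maxZoom : Int) : List Int :=
  if h : (x, y, zoom) ∉ tiles then [0, 0]
  else if zoom = maxZoom then [0, 1]
  else
    let subTrees :=
      buildTileMask tiles (x * 2) (y * 2) (zoom + 1) maxZoom ++
      buildTileMask tiles (x * 2 + 1) (y * 2) (zoom + 1) maxZoom ++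
      buildTileMask tiles (x * 2) (y * 2 + 1) (zoom + 1) maxZoom ++
      buildTileMask tiles (x * 2 + 1) (y * 2 + 1) (zoom + 1) maxZoom
    if subTrees = [0, 1, 0, 1, 0, 1, 0, 1] then [0, 1]
    else [1, 1] ++ subTrees
termination_by (pvMaxZ tiles + 1 - zoom).toNat
decreasing_by
  all_goals exact pvDepth_lt tiles x y zoom (not_not.mp h)

-- ===== PORT B =====
-- weight of a work frame, for termination of the stack loop
def pvWt (M : Int) (f : Bool × Int × Int × Int) : Nat :=
  if f.1 then 1 else 5 ^ ((M + 1 - f.2.2.2).toNat + 1)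

-- the four pops + combine of Source B's `if combine:` branch; vals is kept most-recent-first
-- (Python appends/pops at the end of its list); the `| _ => vals` arm guards the pops
-- (unreachable on reachable states; Python would raise there and never does)
def pvCombine (vals : List (List Int)) : List (List Int) :=
  match vals with
  | r4 :: r3 :: r2 :: r1 :: rest =>
    let sub := r1 ++ r2 ++ r3 ++ r4
    (if sub = [0, 1, 0, 1, 0, 1, 0, 1] then [0, 1] else [1, 1] ++ sub) :: rest
  | _ => vals

-- termination lemmas for the stack loop (cited by name in its decreasing_by)
theorem pvWt_pos (M : Int) (f : Bool × Int × Int × Int) : 0 < pvWt M f := by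
  unfold pvWt
  split
  · omega
  · exact pow_pos (by norm_num) _

theorem pvWsum_lt_cons (M : Int) (f : Bool × Int × Int × Int)
    (ws : List (Bool × Int × Int × Int)) :
    (ws.map (pvWt M)).sum < (((f :: ws)).map (pvWt M)).sum := by
  have := pvWt_pos M f
  simp only [List.map_cons, List.sum_cons]
  omega

theorem pvExpand_lt (M cx cy cz : Int) (ws : List (Bool × Int × Int × Int))
    (hle : cz ≤ M) :
    (((false, cx * 2, cy * 2, cz + 1) ::
      (false, cx * 2 + 1, cy * 2, cz + 1) ::
      (false, cx * 2, cy * 2 + 1, cz + 1) ::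
      (false, cx * 2 + 1, cy * 2 + 1, cz + 1) ::
      (true, cx, cy, cz) :: ws).map (pvWt M)).sum <
    (((false, cx, cy, cz) :: ws).map (pvWt M)).sum := by
  have hd : (M + 1 - cz).toNat = (M - cz).toNat + 1 := by omega
  have hk1 : 1 ≤ 5 ^ (M - cz).toNat := Nat.one_le_pow _ _ (by norm_num)
  simp [pvWt, hd, pow_succ]
  omega

-- the while-work loop of Source B; the `if combine:` test is the Bool in the frame pattern
def pvLoop (tiles : List (Int × Int × Int)) (maxZoom : Int) :
    List (Bool × Int × Int × Int) → List (List Int) → List (List Int)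
  | [], vals => vals
  | (true, _, _, _) :: ws, vals => pvLoop tiles maxZoom ws (pvCombine vals)
  | (false, cx, cy, cz) :: ws, vals =>
    if h : (cx, cy, cz) ∉ tiles then pvLoop tiles maxZoom ws ([0, 0] :: vals)
    else if cz = maxZoom then pvLoop tiles maxZoom ws ([0, 1] :: vals)
    else
      pvLoop tiles maxZoom
        ((false, cx * 2, cy * 2, cz + 1) ::
         (false, cx * 2 + 1, cy * 2, cz + 1) ::
         (false, cx * 2, cy * 2 + 1, cz + 1) ::
         (false, cx * 2 + 1, cy * 2 + 1, cz + 1) ::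
         (true, cx, cy, cz) :: ws) vals
termination_by ws _ => (ws.map (pvWt (pvMaxZ tiles))).sum
decreasing_by
  · exact pvWsum_lt_cons _ _ _
  · exact pvWsum_lt_cons _ _ _
  · exact pvWsum_lt_cons _ _ _
  · exact pvExpand_lt _ _ _ _ _ (pvMem_le_maxZ tiles cx cy cz (not_not.mp h))

def buildTileMask_alt (tiles : List (Int × Int × Int)) (x : Int) (y : Int) (zoom : Int) (maxZoom : Int) : List Int :=
  (pvLoop tiles maxZoom [(false, x, y, zoom)] []).headD []

-- ===== PRECONDITION & SPEC =====
def Spec_buildTileMask (tiles : List (Int × Int × Int)) (x : Int) (y : Int) (zoom : Int) (maxZoom : Int) (out : List Int) : Prop := out = buildTileMask_alt tiles x y zoom maxZoom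
instance (tiles : List (Int × Int × Int)) (x : Int) (y : Int) (zoom : Int) (maxZoom : Int) (out : List Int) : Decidable (Spec_buildTileMask tiles x y zoom maxZoom out) := by unfold Spec_buildTileMask; infer_instance

-- ===== CLAIM (what is proved, stated in full; the proofs are below) =====
def Claim_equal_buildTileMask : Prop := ∀ (tiles : List (Int × Int × Int)) (x : Int) (y : Int) (zoom : Int) (maxZoom : Int), Dom_buildTileMask tiles x y zoom maxZoom → Spec_buildTileMask tiles x y zoom maxZoom (buildTileMask tiles x y zoom maxZoom)

-- ===== LEMMAS AND PROOFS =====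

-- one step of the stack machine on a descend frame computes A's recursive value
theorem pvLoop_descend (tiles : List (Int × Int × Int)) (maxZoom : Int) :
    ∀ (n : Nat) (x y z : Int) (ws : List (Bool × Int × Int × Int)) (vs : List (List Int)),
      (pvMaxZ tiles + 1 - z).toNat ≤ n →
      pvLoop tiles maxZoom ((false, x, y, z) :: ws) vs =
        pvLoop tiles maxZoom ws (buildTileMask tiles x y z maxZoom :: vs) := by
  intro n
  induction n with
  | zero =>
    intro x y z ws vs hn
    have hmem : (x, y, z) ∉ tiles := by
      intro hm
      have := pvMem_le_maxZ tiles x y z hm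
      omega
    rw [pvLoop, buildTileMask]
    simp [hmem]
  | succ n ih =>
    intro x y z ws vs hn
    by_cases hmem : (x, y, z) ∈ tiles
    · by_cases hz : z = maxZoom
      · subst hz
        rw [pvLoop, buildTileMask]
        simp [hmem]
      · have hle := pvMem_le_maxZ tiles x y z hmem
        have hn' : (pvMaxZ tiles + 1 - (z + 1)).toNat ≤ n := by omega
        rw [pvLoop]
        simp only [dif_neg (not_not_intro hmem), if_neg hz]
        rw [ih _ _ _ _ _ hn', ih _ _ _ _ _ hn', ih _ _ _ _ _ hn', ih _ _ _ _ _ hn']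
        rw [pvLoop]
        conv_rhs => rw [buildTileMask]
        simp only [dif_neg (not_not_intro hmem), if_neg hz, pvCombine]
    · rw [pvLoop, buildTileMask]
      simp [hmem]

-- ===== VERDICT (by name: the statement is the Claim_ definition above) =====
theorem buildTileMask_spec : Claim_equal_buildTileMask := by
  intro tiles x y zoom maxZoom _
  unfold Spec_buildTileMask buildTileMask_alt
  rw [pvLoop_descend tiles maxZoom (pvMaxZ tiles + 1 - zoom).toNat x y zoom [] [] le_rfl]
  rw [pvLoop]
  rfl
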